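-- pv_equiv track=rewrite | github.com/humzam574/LeetCode | 3538-alt-and-tab-simulation/alt-and-tab-simulation.py | simulationResult
-- ===== SOURCE A (Python) =====
-- from typing import List
--
-- def simulationResult(windows: List[int], queries: List[int]) -> List[int]:
--     ans = []
--     seen = set()
--     for q in queries[::-1]:
--         if q not in seen:
--             ans.append(q)
--             seen.add(q)
--     for w in windows:
--         if w not in seen:
--             ans.append(w)
--     return ans
-- ===== SOURCE B (Python) =====
-- from typing import List
--
-- def simulationResult(windows: List[int], queries: List[int]) -> List[int]:
--     # Count occurrences first; in a second forward pass, a query is its value's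
--     # LAST occurrence exactly when its remaining count drops to zero, so collect
--     # those (ascending) and reverse.  No seen-set and no reversed scan needed.
--     remaining = {}
--     for q in queries:
--         remaining[q] = remaining.get(q, 0) + 1
--     out = []
--     for q in queries:
--         remaining[q] -= 1
--         if remaining[q] == 0:
--             out.append(q)
--     out.reverse()
--     for w in windows:
--         if w not in remaining:
--             out.append(w)
--     return out
-- ===== Notes on version B (the rewrite author's own statement) =====
-- stated objective: alternative
-- what changed: Replaces A's reversed scan with a seen-set by a two-pass counting scheme: a first pass builds an occurrence counter over queries, a second forward pass emits each value exactly when its remaining count drops to zero (its last occurrence), the result is reversed, and windows absent from the counter's keys are appended.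
import Mathlib
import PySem

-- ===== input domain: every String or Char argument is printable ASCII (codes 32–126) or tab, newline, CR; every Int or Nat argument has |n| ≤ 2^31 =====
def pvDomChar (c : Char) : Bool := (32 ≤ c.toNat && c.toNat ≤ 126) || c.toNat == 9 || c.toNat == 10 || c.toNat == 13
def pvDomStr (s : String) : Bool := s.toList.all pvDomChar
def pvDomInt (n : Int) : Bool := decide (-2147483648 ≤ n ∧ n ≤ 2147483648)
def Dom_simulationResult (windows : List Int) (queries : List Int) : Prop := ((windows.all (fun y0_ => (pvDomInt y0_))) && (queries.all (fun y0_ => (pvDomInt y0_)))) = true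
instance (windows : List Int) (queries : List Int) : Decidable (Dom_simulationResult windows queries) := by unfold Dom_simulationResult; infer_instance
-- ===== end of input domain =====

-- B replaces A's reversed scan with a seen-set by a two-pass counting scheme: count every
-- query value, then emit each value at the pass where its remaining count drops to zero
-- (its last occurrence), reverse, and append the windows absent from the counter.

-- ===== PORT A =====
def simulationResult (windows : List Int) (queries : List Int) : List Int :=
  let rev := (PySem.List.slice? queries none none (-1)).getD []
  let st := rev.foldl
    (fun st q => if PySem.Set.contains st.2 q then st else (st.1 ++ [q], PySem.Set.add st.2 q))
    (([] : List Int), (PySem.Set.empty : PySem.Set Int))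
  (windows.foldl
    (fun st w => if PySem.Set.contains st.2 w then st else (st.1 ++ [w], st.2)) st).1

-- ===== PORT B =====
def simulationResult_alt (windows : List Int) (queries : List Int) : List Int :=
  let remaining := queries.foldl
    (fun d q => d.insert q (d.getD q 0 + 1)) (PySem.Dict.empty : PySem.Dict Int Int)
  let st := queries.foldl
    (fun st q =>
      let d := st.1.insert q (st.1.getD q 0 - 1)
      if d.getD q 0 == 0 then (d, st.2 ++ [q]) else (d, st.2))
    (remaining, ([] : List Int))
  let out := st.2.reverse
  windows.foldl (fun acc w => if st.1.contains w then acc else acc ++ [w]) out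

-- ===== PRECONDITION & SPEC =====
def Spec_simulationResult (windows : List Int) (queries : List Int) (out : List Int) : Prop := out = simulationResult_alt windows queries
instance (windows : List Int) (queries : List Int) (out : List Int) : Decidable (Spec_simulationResult windows queries out) := by unfold Spec_simulationResult; infer_instance

-- ===== CLAIM (what is proved, stated in full; the proofs are below) =====
def Claim_equal_simulationResult : Prop := ∀ (windows : List Int) (queries : List Int), Dom_simulationResult windows queries → Spec_simulationResult windows queries (simulationResult windows queries)

-- ===== LEMMAS AND PROOFS =====

lemma setContains_eq (s : PySem.Set Int) (x : Int) : PySem.Set.contains s x = decide (x ∈ s) := by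
  simp [PySem.Set.contains_eq_listContains]

-- last-occurrence dedup of L, in ascending order of last occurrence (proof helper)
def lastAcc : List Int → List Int
  | [] => []
  | q :: rest => if q ∈ rest then lastAcc rest else q :: lastAcc rest

-- lastAcc is the reverse of A's first-occurrence dedup of the reversed list
lemma lastAcc_eq : ∀ L : List Int, lastAcc L = (PySem.Set.ofList L.reverse).reverse := by
  intro L
  induction L with
  | nil => simp [lastAcc, PySem.Set.ofList_nil]
  | cons q rest ih =>
    rw [lastAcc, List.reverse_cons, PySem.Set.ofList_append_singleton]
    by_cases hq : q ∈ rest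
    · rw [if_pos hq, PySem.Set.add_of_mem (by simpa [PySem.Set.mem_ofList] using hq), ih]
    · rw [if_neg hq, PySem.Set.add_of_not_mem (by simpa [PySem.Set.mem_ofList] using hq), ih,
        List.reverse_append]
      rfl

-- A's first loop keeps ans and seen equal as lists
lemma aLoop1 : ∀ (L : List Int) (s : PySem.Set Int),
    L.foldl (fun st q => if PySem.Set.contains st.2 q then st else (st.1 ++ [q], PySem.Set.add st.2 q))
        ((s : List Int), s)
      = (PySem.Set.update s L, PySem.Set.update s L) := by
  intro L
  induction L with
  | nil => intro s; simp [PySem.Set.update]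
  | cons q rest ih =>
    intro s
    rw [List.foldl_cons, PySem.Set.update_cons]
    by_cases h : q ∈ s
    · have hc : PySem.Set.contains s q = true := by rw [setContains_eq]; simp [h]
      simp only [hc, if_pos]
      rw [PySem.Set.add_of_mem h]
      exact ih s
    · have hc : PySem.Set.contains s q = false := by rw [setContains_eq]; simp [h]
      simp only [hc, Bool.false_eq_true, if_neg, not_false_iff]
      rw [PySem.Set.add_of_not_mem h]
      exact ih (s ++ [q])

-- A's second loop, with the set component frozen
lemma aLoop2 : ∀ (ws acc : List Int) (s : PySem.Set Int),
    (ws.foldl (fun st w => if PySem.Set.contains st.2 w then st else (st.1 ++ [w], st.2)) (acc, s)).1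
      = acc ++ ws.filter (fun w => !PySem.Set.contains s w) := by
  intro ws
  induction ws with
  | nil => intro acc s; simp
  | cons w rest ih =>
    intro acc s
    rw [List.foldl_cons, List.filter_cons]
    by_cases h : w ∈ s
    · have h1 := ih acc s
      simp only [setContains_eq, decide_eq_true_eq] at h1 ⊢
      simp [h, h1]
    · have h1 := ih (acc ++ [w]) s
      simp only [setContains_eq, decide_eq_true_eq] at h1 ⊢
      simp [h, h1]

-- B's decrement loop: if the dict carries exactly the multiplicities of L, the output
-- component collects exactly the last occurrences (lastAcc L)
lemma bLoop_snd : ∀ (L : List Int) (d : PySem.Dict Int Int) (out : List Int),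
    (∀ x, d.getD x 0 = (L.count x : Int)) →
    (L.foldl (fun st q =>
        let d := st.1.insert q (st.1.getD q 0 - 1)
        if d.getD q 0 == 0 then (d, st.2 ++ [q]) else (d, st.2)) (d, out)).2
      = out ++ lastAcc L := by
  intro L
  induction L with
  | nil => intro d out _; simp [lastAcc]
  | cons q rest ih =>
    intro d out h
    rw [List.foldl_cons]
    have hq : (d.insert q (d.getD q 0 - 1)).getD q 0 = (rest.count q : Int) := by
      rw [PySem.Dict.getD_insert_self, h q, List.count_cons_self]
      push_cast; ring
    have hinv : ∀ x, (d.insert q (d.getD q 0 - 1)).getD x 0 = (rest.count x : Int) := by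
      intro x
      by_cases hx : x = q
      · rw [hx]; exact hq
      · rw [PySem.Dict.getD_insert, if_neg hx, h x]
        simp [Ne.symm hx]
    by_cases hmem : q ∈ rest
    · have hne : ((d.insert q (d.getD q 0 - 1)).getD q 0 == 0) = false := by
        rw [hq]
        simp [Int.natCast_eq_zero, Nat.pos_iff_ne_zero.mp (List.count_pos_iff.mpr hmem)]
      simp only [hne, Bool.false_eq_true, if_neg, not_false_iff, lastAcc, if_pos hmem]
      exact ih _ out hinv
    · have hz : ((d.insert q (d.getD q 0 - 1)).getD q 0 == 0) = true := by
        rw [hq]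
        simp [List.count_eq_zero_of_not_mem hmem]
      simp only [hz, if_pos, lastAcc, if_neg hmem]
      rw [ih _ (out ++ [q]) hinv, List.append_assoc]
      rfl

-- B's decrement loop only overwrites values; key membership is only enlarged by elements of L
lemma bLoop_fst_contains : ∀ (L : List Int) (st : PySem.Dict Int Int × List Int) (x : Int),
    (L.foldl (fun st q =>
        let d := st.1.insert q (st.1.getD q 0 - 1)
        if d.getD q 0 == 0 then (d, st.2 ++ [q]) else (d, st.2)) st).1.contains x
      = (st.1.contains x || decide (x ∈ L)) := by
  intro L
  induction L with
  | nil => intro st x; simp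
  | cons q rest ih =>
    intro st x
    rw [List.foldl_cons]
    by_cases h : ((st.1.insert q (st.1.getD q 0 - 1)).getD q 0 == 0) = true
    · simp only [h, if_pos]
      rw [ih, PySem.Dict.contains_insert]
      by_cases hx : x = q
      · subst hx; simp
      · simp [beq_eq_false_iff_ne.mpr hx, List.mem_cons, hx]
    · rw [Bool.not_eq_true] at h
      simp only [h, Bool.false_eq_true, if_neg, not_false_iff]
      rw [ih, PySem.Dict.contains_insert]
      by_cases hx : x = q
      · subst hx; simp
      · simp [beq_eq_false_iff_ne.mpr hx, List.mem_cons, hx]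

-- B's final loop over windows
lemma bLoop3 : ∀ (ws acc : List Int) (p : Int → Bool),
    ws.foldl (fun acc w => if p w then acc else acc ++ [w]) acc
      = acc ++ ws.filter (fun w => !p w) := by
  intro ws
  induction ws with
  | nil => intro acc p; simp
  | cons w rest ih =>
    intro acc p
    rw [List.foldl_cons, List.filter_cons]
    by_cases h : p w = true
    · simp [h, ih acc p]
    · simp [h, ih (acc ++ [w]) p]

-- ===== VERDICT (by name: the statement is the Claim_ definition above) =====
theorem simulationResult_spec : Claim_equal_simulationResult := by
  intro windows queries _
  unfold Spec_simulationResult simulationResult simulationResult_alt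
  simp only [PySem.List.slice?_none_none_neg_one, Option.getD_some]
  -- A side
  have hS : (PySem.Set.empty : PySem.Set Int) = ([] : List Int) := rfl
  have h1 := aLoop1 queries.reverse (PySem.Set.empty : PySem.Set Int)
  rw [hS] at h1
  have hupd : PySem.Set.update ([] : PySem.Set Int) queries.reverse
      = PySem.Set.ofList queries.reverse := PySem.Set.update_nil_left _
  rw [hS, h1, hupd, aLoop2]
  -- B side
  have hcounter : queries.foldl (fun d q => d.insert q (d.getD q 0 + 1))
      (PySem.Dict.empty : PySem.Dict Int Int) = PySem.Dict.counter queries :=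
    PySem.Dict.foldl_insert_getD_add_one_eq_counter queries
  rw [hcounter]
  have hinv : ∀ x, (PySem.Dict.counter queries).getD x 0 = (queries.count x : Int) := by
    intro x; exact PySem.Dict.getD_counter queries x
  rw [bLoop_snd queries _ [] hinv, bLoop3, List.nil_append]
  -- the two pieces agree
  rw [lastAcc_eq, List.reverse_reverse]
  congr 1
  apply List.filter_congr
  intro w _
  have hA : PySem.Set.contains (PySem.Set.ofList queries.reverse) w = decide (w ∈ queries) := by
    rw [setContains_eq]; simp [PySem.Set.mem_ofList]
  have hB : (queries.foldl (fun st q =>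
        let d := st.1.insert q (st.1.getD q 0 - 1)
        if d.getD q 0 == 0 then (d, st.2 ++ [q]) else (d, st.2))
        (PySem.Dict.counter queries, ([] : List Int))).1.contains w = decide (w ∈ queries) := by
    rw [bLoop_fst_contains]
    have : (PySem.Dict.counter queries).contains w = decide (w ∈ queries) := by
      rw [PySem.Dict.contains_eq_decide_mem_keys, PySem.Dict.keys_counter]
      simp [PySem.Set.mem_ofList]
    rw [this]; simp
  rw [hA, hB]
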